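-- pv_equiv track=rewrite | github.com/Younghoda/programmers | Python3/Basic/day08_Condition_Str.py | solution
-- ===== SOURCE A (Python) =====
-- def solution(a, b, c, d):
--     arr = [a,b,c,d]
--     arr_set_list = list(set(arr))
--     if len(arr_set_list) == 1:
--         answer = 1111 * arr_set_list[0]
--     elif len(arr_set_list) == 2:
--         for p in arr:
--             if arr.count(p) == 3:
--                 p = p
--                 q = [x for x in arr_set_list if x != p][0]
--                 answer = (10*p +q)**2
--             elif arr.count(p) == 2:
--                 p = p
--                 q = [x for x in arr_set_list if x != p][0]
--                 answer = (p+q)*abs(p-q)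
--     elif len(arr_set_list) == 3:
--         for p in arr:
--             if arr.count(p)==2:
--                 p=p
--                 new_list=[x for x in arr_set_list if x != p]
--                 answer= new_list[0] * new_list[1]
--     else:
--         answer= min(arr)
--     return answer
-- ===== SOURCE B (Python) =====
-- def solution(a, b, c, d):
--     # Comparison-based: sort the four values once, then dispatch on
--     # adjacency equalities in the sorted order (no counting at all).
--     w, x, y, z = sorted((a, b, c, d))
--     if w == z:                 # all four equal
--         return 1111 * w
--     if w == y:                 # low triple w=x=y, single z
--         return (10 * w + z) ** 2
--     if x == z:                 # high triple x=y=z, single w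
--         return (10 * x + w) ** 2
--     if w == x and y == z:      # two pairs
--         return (w + y) * (y - w)
--     if w == x:                 # low pair, singles y, z
--         return y * z
--     if x == y:                 # middle pair, singles w, z
--         return w * z
--     if y == z:                 # high pair, singles w, x
--         return w * x
--     return w                   # all distinct: minimum
-- ===== Notes on version B (the rewrite author's own statement) =====
-- stated objective: alternative
-- what changed: Replaced A's set-size branching with arr.count rescans inside loops by a comparison-based method: sort the four values once and dispatch purely on adjacency equalities in the sorted order, with no counting or set construction at all.
import Mathlib
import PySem

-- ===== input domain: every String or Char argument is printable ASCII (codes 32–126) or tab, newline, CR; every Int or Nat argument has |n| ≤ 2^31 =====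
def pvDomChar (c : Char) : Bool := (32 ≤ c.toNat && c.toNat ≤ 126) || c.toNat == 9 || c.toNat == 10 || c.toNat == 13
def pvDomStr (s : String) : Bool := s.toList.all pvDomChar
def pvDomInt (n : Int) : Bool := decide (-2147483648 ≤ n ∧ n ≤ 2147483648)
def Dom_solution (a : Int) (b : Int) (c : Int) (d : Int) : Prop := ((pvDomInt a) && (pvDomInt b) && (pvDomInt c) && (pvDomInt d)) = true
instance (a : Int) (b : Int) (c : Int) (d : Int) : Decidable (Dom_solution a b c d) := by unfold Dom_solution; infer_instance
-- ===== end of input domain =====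

-- B replaces A's set-size branching plus .count rescans by sorting the four values once and dispatching on adjacency equalities in the sorted order (objective: alternative).


-- ===== PORT A =====
def solution (a : Int) (b : Int) (c : Int) (d : Int) : Int :=
  let arr : List Int := [a, b, c, d]
  let arrSetList : List Int := PySem.Set.ofList arr
  if arrSetList.length = 1 then
    1111 * PySem.List.pyGetD arrSetList 0 0
  else if arrSetList.length = 2 then
    arr.foldl (fun answer p =>
      if PySem.List.count arr p = 3 then
        let q := PySem.List.pyGetD (arrSetList.filter (fun x => x ≠ p)) 0 0
        (10 * p + q) ^ 2
      else if PySem.List.count arr p = 2 then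
        let q := PySem.List.pyGetD (arrSetList.filter (fun x => x ≠ p)) 0 0
        (p + q) * |p - q|
      else answer) 0
  else if arrSetList.length = 3 then
    arr.foldl (fun answer p =>
      if PySem.List.count arr p = 2 then
        let newList := arrSetList.filter (fun x => x ≠ p)
        PySem.List.pyGetD newList 0 0 * PySem.List.pyGetD newList 1 0
      else answer) 0
  else
    (PySem.List.min? arr (fun x => x)).getD 0

-- ===== PORT B =====
def solution_alt (a : Int) (b : Int) (c : Int) (d : Int) : Int :=
  match PySem.List.sorted [a, b, c, d] (fun v => v) false with
  | [w, x, y, z] =>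
    if w = z then 1111 * w
    else if w = y then (10 * w + z) ^ 2
    else if x = z then (10 * x + w) ^ 2
    else if w = x ∧ y = z then (w + y) * (y - w)
    else if w = x then y * z
    else if x = y then w * z
    else if y = z then w * x
    else w
  | _ => 0  -- unreachable: sorting four values yields four values

-- ===== PRECONDITION & SPEC =====
def Spec_solution (a : Int) (b : Int) (c : Int) (d : Int) (out : Int) : Prop := out = solution_alt a b c d
instance (a : Int) (b : Int) (c : Int) (d : Int) (out : Int) : Decidable (Spec_solution a b c d out) := by unfold Spec_solution; infer_instance

-- ===== CLAIM (what is proved, stated in full; the proofs are below) =====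
def Claim_equal_solution : Prop := ∀ (a : Int) (b : Int) (c : Int) (d : Int), Dom_solution a b c d → Spec_solution a b c d (solution a b c d)

-- ===== LEMMAS AND PROOFS =====

lemma pv01 (p : Int)  :
    solution p p p p = solution_alt p p p p := by
  simp [solution, solution_alt, PySem.Set.ofList, PySem.Set.add, PySem.List.count,
      PySem.List.pyGetD, PySem.List.pyGet?, PySem.List.pyIdx?, PySem.List.sorted,
      PySem.List.insertBy, PySem.List.min?, List.count, List.countP_cons, List.countP_nil,
      beq_iff_eq] <;>
  first | rfl | omega | ring1

lemma pv02 (p : Int) (q : Int) (hnqp : ¬ q = p) :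
    solution p p p q = solution_alt p p p q := by
  by_cases h1 : q < p <;>
    by_cases h2 : p < q <;>
  (try omega) <;>
  simp [solution, solution_alt, PySem.Set.ofList, PySem.Set.add, PySem.List.count,
      PySem.List.pyGetD, PySem.List.pyGet?, PySem.List.pyIdx?, PySem.List.sorted,
      PySem.List.insertBy, PySem.List.min?, List.count, List.countP_cons, List.countP_nil,
      beq_iff_eq, h1, h2, hnqp, Ne.symm hnqp] <;>
  first | rfl | omega | ring1 | (rw [show |q - p| = q - p from abs_of_nonneg (by omega)]; ring1) | (rw [show |q - p| = -(q - p) from abs_of_nonpos (by omega)]; ring1) | (rw [show |p - q| = p - q from abs_of_nonneg (by omega)]; ring1) | (rw [show |p - q| = -(p - q) from abs_of_nonpos (by omega)]; ring1) | (left; first | (rw [show |q - p| = q - p from abs_of_nonneg (by omega)]; ring1) | (rw [show |q - p| = -(q - p) from abs_of_nonpos (by omega)]; ring1) | (rw [show |p - q| = p - q from abs_of_nonneg (by omega)]; ring1) | (rw [show |p - q| = -(p - q) from abs_of_nonpos (by omega)]; ring1)) | (left; omega)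

lemma pv03 (p : Int) (q : Int) (hnqp : ¬ q = p) :
    solution p p q p = solution_alt p p q p := by
  by_cases h1 : q < p <;>
    by_cases h2 : p < q <;>
  (try omega) <;>
  simp [solution, solution_alt, PySem.Set.ofList, PySem.Set.add, PySem.List.count,
      PySem.List.pyGetD, PySem.List.pyGet?, PySem.List.pyIdx?, PySem.List.sorted,
      PySem.List.insertBy, PySem.List.min?, List.count, List.countP_cons, List.countP_nil,
      beq_iff_eq, h1, h2, hnqp, Ne.symm hnqp] <;>
  first | rfl | omega | ring1 | (rw [show |q - p| = q - p from abs_of_nonneg (by omega)]; ring1) | (rw [show |q - p| = -(q - p) from abs_of_nonpos (by omega)]; ring1) | (rw [show |p - q| = p - q from abs_of_nonneg (by omega)]; ring1) | (rw [show |p - q| = -(p - q) from abs_of_nonpos (by omega)]; ring1) | (left; first | (rw [show |q - p| = q - p from abs_of_nonneg (by omega)]; ring1) | (rw [show |q - p| = -(q - p) from abs_of_nonpos (by omega)]; ring1) | (rw [show |p - q| = p - q from abs_of_nonneg (by omega)]; ring1) | (rw [show |p - q| = -(p - q) from abs_of_nonpos (by omega)]; ring1)) | (left; omega)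

lemma pv04 (p : Int) (q : Int) (hnqp : ¬ q = p) :
    solution p p q q = solution_alt p p q q := by
  by_cases h1 : q < p <;>
    by_cases h2 : p < q <;>
  (try omega) <;>
  simp [solution, solution_alt, PySem.Set.ofList, PySem.Set.add, PySem.List.count,
      PySem.List.pyGetD, PySem.List.pyGet?, PySem.List.pyIdx?, PySem.List.sorted,
      PySem.List.insertBy, PySem.List.min?, List.count, List.countP_cons, List.countP_nil,
      beq_iff_eq, h1, h2, hnqp, Ne.symm hnqp] <;>
  first | rfl | omega | ring1 | (rw [show |q - p| = q - p from abs_of_nonneg (by omega)]; ring1) | (rw [show |q - p| = -(q - p) from abs_of_nonpos (by omega)]; ring1) | (rw [show |p - q| = p - q from abs_of_nonneg (by omega)]; ring1) | (rw [show |p - q| = -(p - q) from abs_of_nonpos (by omega)]; ring1) | (left; first | (rw [show |q - p| = q - p from abs_of_nonneg (by omega)]; ring1) | (rw [show |q - p| = -(q - p) from abs_of_nonpos (by omega)]; ring1) | (rw [show |p - q| = p - q from abs_of_nonneg (by omega)]; ring1) | (rw [show |p - q| = -(p - q) from abs_of_nonpos (by omega)]; ring1)) | (left; omega)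

lemma pv05 (p : Int) (q : Int) (hnqp : ¬ q = p) :
    solution p q p p = solution_alt p q p p := by
  by_cases h1 : q < p <;>
    by_cases h2 : p < q <;>
  (try omega) <;>
  simp [solution, solution_alt, PySem.Set.ofList, PySem.Set.add, PySem.List.count,
      PySem.List.pyGetD, PySem.List.pyGet?, PySem.List.pyIdx?, PySem.List.sorted,
      PySem.List.insertBy, PySem.List.min?, List.count, List.countP_cons, List.countP_nil,
      beq_iff_eq, h1, h2, hnqp, Ne.symm hnqp] <;>
  first | rfl | omega | ring1 | (rw [show |q - p| = q - p from abs_of_nonneg (by omega)]; ring1) | (rw [show |q - p| = -(q - p) from abs_of_nonpos (by omega)]; ring1) | (rw [show |p - q| = p - q from abs_of_nonneg (by omega)]; ring1) | (rw [show |p - q| = -(p - q) from abs_of_nonpos (by omega)]; ring1) | (left; first | (rw [show |q - p| = q - p from abs_of_nonneg (by omega)]; ring1) | (rw [show |q - p| = -(q - p) from abs_of_nonpos (by omega)]; ring1) | (rw [show |p - q| = p - q from abs_of_nonneg (by omega)]; ring1) | (rw [show |p - q| = -(p - q) from abs_of_nonpos (by omega)]; ring1)) | (left; omega)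

lemma pv06 (p : Int) (q : Int) (hnqp : ¬ q = p) :
    solution p q p q = solution_alt p q p q := by
  by_cases h1 : q < p <;>
    by_cases h2 : p < q <;>
  (try omega) <;>
  simp [solution, solution_alt, PySem.Set.ofList, PySem.Set.add, PySem.List.count,
      PySem.List.pyGetD, PySem.List.pyGet?, PySem.List.pyIdx?, PySem.List.sorted,
      PySem.List.insertBy, PySem.List.min?, List.count, List.countP_cons, List.countP_nil,
      beq_iff_eq, h1, h2, hnqp, Ne.symm hnqp] <;>
  first | rfl | omega | ring1 | (rw [show |q - p| = q - p from abs_of_nonneg (by omega)]; ring1) | (rw [show |q - p| = -(q - p) from abs_of_nonpos (by omega)]; ring1) | (rw [show |p - q| = p - q from abs_of_nonneg (by omega)]; ring1) | (rw [show |p - q| = -(p - q) from abs_of_nonpos (by omega)]; ring1) | (left; first | (rw [show |q - p| = q - p from abs_of_nonneg (by omega)]; ring1) | (rw [show |q - p| = -(q - p) from abs_of_nonpos (by omega)]; ring1) | (rw [show |p - q| = p - q from abs_of_nonneg (by omega)]; ring1) | (rw [show |p - q| = -(p - q) from abs_of_nonpos (by omega)]; ring1)) | (left; omega)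

lemma pv07 (p : Int) (q : Int) (hnqp : ¬ q = p) :
    solution p q q p = solution_alt p q q p := by
  by_cases h1 : q < p <;>
    by_cases h2 : p < q <;>
  (try omega) <;>
  simp [solution, solution_alt, PySem.Set.ofList, PySem.Set.add, PySem.List.count,
      PySem.List.pyGetD, PySem.List.pyGet?, PySem.List.pyIdx?, PySem.List.sorted,
      PySem.List.insertBy, PySem.List.min?, List.count, List.countP_cons, List.countP_nil,
      beq_iff_eq, h1, h2, hnqp, Ne.symm hnqp] <;>
  first | rfl | omega | ring1 | (rw [show |q - p| = q - p from abs_of_nonneg (by omega)]; ring1) | (rw [show |q - p| = -(q - p) from abs_of_nonpos (by omega)]; ring1) | (rw [show |p - q| = p - q from abs_of_nonneg (by omega)]; ring1) | (rw [show |p - q| = -(p - q) from abs_of_nonpos (by omega)]; ring1) | (left; first | (rw [show |q - p| = q - p from abs_of_nonneg (by omega)]; ring1) | (rw [show |q - p| = -(q - p) from abs_of_nonpos (by omega)]; ring1) | (rw [show |p - q| = p - q from abs_of_nonneg (by omega)]; ring1) | (rw [show |p - q| = -(p - q) from abs_of_nonpos (by omega)]; ring1)) | (left; omega)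

lemma pv08 (p : Int) (q : Int) (hnqp : ¬ q = p) :
    solution p q q q = solution_alt p q q q := by
  by_cases h1 : q < p <;>
    by_cases h2 : p < q <;>
  (try omega) <;>
  simp [solution, solution_alt, PySem.Set.ofList, PySem.Set.add, PySem.List.count,
      PySem.List.pyGetD, PySem.List.pyGet?, PySem.List.pyIdx?, PySem.List.sorted,
      PySem.List.insertBy, PySem.List.min?, List.count, List.countP_cons, List.countP_nil,
      beq_iff_eq, h1, h2, hnqp, Ne.symm hnqp] <;>
  first | rfl | omega | ring1 | (rw [show |q - p| = q - p from abs_of_nonneg (by omega)]; ring1) | (rw [show |q - p| = -(q - p) from abs_of_nonpos (by omega)]; ring1) | (rw [show |p - q| = p - q from abs_of_nonneg (by omega)]; ring1) | (rw [show |p - q| = -(p - q) from abs_of_nonpos (by omega)]; ring1) | (left; first | (rw [show |q - p| = q - p from abs_of_nonneg (by omega)]; ring1) | (rw [show |q - p| = -(q - p) from abs_of_nonpos (by omega)]; ring1) | (rw [show |p - q| = p - q from abs_of_nonneg (by omega)]; ring1) | (rw [show |p - q| = -(p - q) from abs_of_nonpos (by omega)]; ring1)) | (left; omega)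

lemma pv09 (p : Int) (q : Int) (r : Int) (hnqp : ¬ q = p) (hnrp : ¬ r = p) (hnrq : ¬ r = q) :
    solution p p q r = solution_alt p p q r := by
  by_cases h1 : q < p <;>
    by_cases h2 : p < q <;>
    by_cases h3 : r < p <;>
    by_cases h4 : p < r <;>
    by_cases h5 : r < q <;>
    by_cases h6 : q < r <;>
  (try omega) <;>
  simp [solution, solution_alt, PySem.Set.ofList, PySem.Set.add, PySem.List.count,
      PySem.List.pyGetD, PySem.List.pyGet?, PySem.List.pyIdx?, PySem.List.sorted,
      PySem.List.insertBy, PySem.List.min?, List.count, List.countP_cons, List.countP_nil,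
      beq_iff_eq, h1, h2, h3, h4, h5, h6, hnqp, hnrp, hnrq, Ne.symm hnqp, Ne.symm hnrp, Ne.symm hnrq] <;>
  first | rfl | omega | ring1

lemma pv10 (p : Int) (q : Int) (r : Int) (hnqp : ¬ q = p) (hnrp : ¬ r = p) (hnrq : ¬ r = q) :
    solution p q p r = solution_alt p q p r := by
  by_cases h1 : q < p <;>
    by_cases h2 : p < q <;>
    by_cases h3 : r < p <;>
    by_cases h4 : p < r <;>
    by_cases h5 : r < q <;>
    by_cases h6 : q < r <;>
  (try omega) <;>
  simp [solution, solution_alt, PySem.Set.ofList, PySem.Set.add, PySem.List.count,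
      PySem.List.pyGetD, PySem.List.pyGet?, PySem.List.pyIdx?, PySem.List.sorted,
      PySem.List.insertBy, PySem.List.min?, List.count, List.countP_cons, List.countP_nil,
      beq_iff_eq, h1, h2, h3, h4, h5, h6, hnqp, hnrp, hnrq, Ne.symm hnqp, Ne.symm hnrp, Ne.symm hnrq] <;>
  first | rfl | omega | ring1

lemma pv11 (p : Int) (q : Int) (r : Int) (hnqp : ¬ q = p) (hnrp : ¬ r = p) (hnrq : ¬ r = q) :
    solution p q q r = solution_alt p q q r := by
  by_cases h1 : q < p <;>
    by_cases h2 : p < q <;>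
    by_cases h3 : r < p <;>
    by_cases h4 : p < r <;>
    by_cases h5 : r < q <;>
    by_cases h6 : q < r <;>
  (try omega) <;>
  simp [solution, solution_alt, PySem.Set.ofList, PySem.Set.add, PySem.List.count,
      PySem.List.pyGetD, PySem.List.pyGet?, PySem.List.pyIdx?, PySem.List.sorted,
      PySem.List.insertBy, PySem.List.min?, List.count, List.countP_cons, List.countP_nil,
      beq_iff_eq, h1, h2, h3, h4, h5, h6, hnqp, hnrp, hnrq, Ne.symm hnqp, Ne.symm hnrp, Ne.symm hnrq] <;>
  first | rfl | omega | ring1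

lemma pv12 (p : Int) (q : Int) (r : Int) (hnqp : ¬ q = p) (hnrp : ¬ r = p) (hnrq : ¬ r = q) :
    solution p q r p = solution_alt p q r p := by
  by_cases h1 : q < p <;>
    by_cases h2 : p < q <;>
    by_cases h3 : r < p <;>
    by_cases h4 : p < r <;>
    by_cases h5 : r < q <;>
    by_cases h6 : q < r <;>
  (try omega) <;>
  simp [solution, solution_alt, PySem.Set.ofList, PySem.Set.add, PySem.List.count,
      PySem.List.pyGetD, PySem.List.pyGet?, PySem.List.pyIdx?, PySem.List.sorted,
      PySem.List.insertBy, PySem.List.min?, List.count, List.countP_cons, List.countP_nil,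
      beq_iff_eq, h1, h2, h3, h4, h5, h6, hnqp, hnrp, hnrq, Ne.symm hnqp, Ne.symm hnrp, Ne.symm hnrq] <;>
  first | rfl | omega | ring1

lemma pv13 (p : Int) (q : Int) (r : Int) (hnqp : ¬ q = p) (hnrp : ¬ r = p) (hnrq : ¬ r = q) :
    solution p q r q = solution_alt p q r q := by
  by_cases h1 : q < p <;>
    by_cases h2 : p < q <;>
    by_cases h3 : r < p <;>
    by_cases h4 : p < r <;>
    by_cases h5 : r < q <;>
    by_cases h6 : q < r <;>
  (try omega) <;>
  simp [solution, solution_alt, PySem.Set.ofList, PySem.Set.add, PySem.List.count,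
      PySem.List.pyGetD, PySem.List.pyGet?, PySem.List.pyIdx?, PySem.List.sorted,
      PySem.List.insertBy, PySem.List.min?, List.count, List.countP_cons, List.countP_nil,
      beq_iff_eq, h1, h2, h3, h4, h5, h6, hnqp, hnrp, hnrq, Ne.symm hnqp, Ne.symm hnrp, Ne.symm hnrq] <;>
  first | rfl | omega | ring1

lemma pv14 (p : Int) (q : Int) (r : Int) (hnqp : ¬ q = p) (hnrp : ¬ r = p) (hnrq : ¬ r = q) :
    solution p q r r = solution_alt p q r r := by
  by_cases h1 : q < p <;>
    by_cases h2 : p < q <;>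
    by_cases h3 : r < p <;>
    by_cases h4 : p < r <;>
    by_cases h5 : r < q <;>
    by_cases h6 : q < r <;>
  (try omega) <;>
  simp [solution, solution_alt, PySem.Set.ofList, PySem.Set.add, PySem.List.count,
      PySem.List.pyGetD, PySem.List.pyGet?, PySem.List.pyIdx?, PySem.List.sorted,
      PySem.List.insertBy, PySem.List.min?, List.count, List.countP_cons, List.countP_nil,
      beq_iff_eq, h1, h2, h3, h4, h5, h6, hnqp, hnrp, hnrq, Ne.symm hnqp, Ne.symm hnrp, Ne.symm hnrq] <;>
  first | rfl | omega | ring1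

lemma pv15 (p : Int) (q : Int) (r : Int) (s : Int) (hnqp : ¬ q = p) (hnrp : ¬ r = p) (hnrq : ¬ r = q) (hnsp : ¬ s = p) (hnsq : ¬ s = q) (hnsr : ¬ s = r) :
    solution p q r s = solution_alt p q r s := by
  by_cases h1 : q < p <;>
    by_cases h2 : r < p <;>
    by_cases h3 : s < p <;>
    by_cases h4 : r < q <;>
    by_cases h5 : s < q <;>
    by_cases h6 : s < r <;>
  (try omega) <;>
  simp [solution, solution_alt, PySem.Set.ofList, PySem.Set.add, PySem.List.count,
      PySem.List.pyGetD, PySem.List.pyGet?, PySem.List.pyIdx?, PySem.List.sorted,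
      PySem.List.insertBy, PySem.List.min?, List.count, List.countP_cons, List.countP_nil,
      beq_iff_eq, h1, h2, h3, h4, h5, h6, hnqp, hnrp, hnrq, hnsp, hnsq, hnsr, Ne.symm hnqp, Ne.symm hnrp, Ne.symm hnrq, Ne.symm hnsp, Ne.symm hnsq, Ne.symm hnsr] <;>
  first | rfl | omega | ring1

-- ===== VERDICT (by name: the statement is the Claim_ definition above) =====
set_option maxHeartbeats 1000000 in
theorem solution_spec : Claim_equal_solution := by
  intro a b c d _
  unfold Spec_solution
  by_cases hba : b = a <;> by_cases hca : c = a <;> by_cases hcb : c = b <;>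
    by_cases hda : d = a <;> by_cases hdb : d = b <;> by_cases hdc : d = c <;>
    (try omega) <;>
    first | (rw [hba, hca, hda]; exact pv01 _) | (rw [hba, hca]; exact pv02 _ _ ‹_›) | (rw [hba, hda]; exact pv03 _ _ ‹_›) | (rw [hba, hdc]; exact pv04 _ _ ‹_›) | (rw [hca, hda]; exact pv05 _ _ ‹_›) | (rw [hca, hdb]; exact pv06 _ _ ‹_›) | (rw [hcb, hda]; exact pv07 _ _ ‹_›) | (rw [hcb, hdb]; exact pv08 _ _ ‹_›) | (rw [hba]; exact pv09 _ _ _ ‹_› ‹_› ‹_›) | (rw [hca]; exact pv10 _ _ _ ‹_› ‹_› ‹_›) | (rw [hcb]; exact pv11 _ _ _ ‹_› ‹_› ‹_›) | (rw [hda]; exact pv12 _ _ _ ‹_› ‹_› ‹_›) | (rw [hdb]; exact pv13 _ _ _ ‹_› ‹_› ‹_›) | (rw [hdc]; exact pv14 _ _ _ ‹_› ‹_› ‹_›) | (exact pv15 _ _ _ _ ‹_› ‹_› ‹_› ‹_› ‹_› ‹_›)
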